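-- pv_equiv track=rewrite | github.com/fahritech04/tubesaka_kelompokbebekayayo | config.py | cari_exact_rekursif
-- ===== SOURCE A (Python) =====
-- def cari_exact_rekursif(data, target_key, target_value, idx=0, hasil=None):
--     """Cari semua item dengan nilai exact match - rekursif"""
--     if hasil is None:
--         hasil = []
--     if idx >= len(data):
--         return hasil or None
--     if data[idx][target_key] == target_value:
--         hasil.append(data[idx])
--     return cari_exact_rekursif(data, target_key, target_value, idx + 1, hasil)
-- ===== SOURCE B (Python) =====
-- def cari_exact_rekursif(data, target_key, target_value, idx=0, hasil=None):
--     """Cari semua item dengan nilai exact match - iteratif"""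
--     if hasil is None:
--         hasil = []
--     for i in range(idx, len(data)):
--         if data[i][target_key] == target_value:
--             hasil.append(data[i])
--     return hasil or None
-- ===== Notes on version B (the rewrite author's own statement) =====
-- stated objective: simpler
-- what changed: Replaces the tail recursion that re-enters the function once per element with a single explicit for-loop over range(idx, len(data)) appending to the same accumulator, then returns 'hasil or None'.
import Mathlib
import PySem

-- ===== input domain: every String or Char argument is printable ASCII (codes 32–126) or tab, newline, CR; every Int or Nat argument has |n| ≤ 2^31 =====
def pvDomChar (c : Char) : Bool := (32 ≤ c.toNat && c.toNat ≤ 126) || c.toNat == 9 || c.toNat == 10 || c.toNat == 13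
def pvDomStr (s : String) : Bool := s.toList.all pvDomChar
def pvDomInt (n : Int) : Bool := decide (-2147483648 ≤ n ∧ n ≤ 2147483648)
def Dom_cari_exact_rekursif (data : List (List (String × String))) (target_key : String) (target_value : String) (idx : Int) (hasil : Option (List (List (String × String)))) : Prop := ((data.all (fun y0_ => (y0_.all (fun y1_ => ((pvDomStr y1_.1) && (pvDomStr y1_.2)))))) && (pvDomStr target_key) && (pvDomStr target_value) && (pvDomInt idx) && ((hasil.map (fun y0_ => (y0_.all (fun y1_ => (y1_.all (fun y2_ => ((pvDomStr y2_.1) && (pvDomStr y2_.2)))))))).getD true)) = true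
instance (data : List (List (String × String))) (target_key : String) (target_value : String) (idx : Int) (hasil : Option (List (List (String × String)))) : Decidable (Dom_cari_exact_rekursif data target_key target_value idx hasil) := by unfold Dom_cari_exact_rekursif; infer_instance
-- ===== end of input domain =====

-- B replaces A's tail recursion (one call per element) by a single explicit for-loop over
-- range(idx, len(data)) on the same accumulator; same return value everywhere A returns.

-- d[k] for a Python dict given as an association list: first matching key (KeyError = none).
def pvDGet (d : List (String × String)) (k : String) : Option String :=
  (d.find? (fun p => p.1 == k)).map (·.2)

-- ===== PORT A =====
-- A's recursive body after the 'hasil is None' unwrap; 'none' in the error arms stands for a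
-- raised IndexError/KeyError (excluded by Pre_, where A returns nothing). The Nat 'fuel'
-- argument only makes the Int-indexed recursion structural (cari_exact_rekursif supplies
-- enough for the loop to run to its 'idx >= len(data)' exit; the 0-arm is unreachable then).
def pvLoopA (data : List (List (String × String))) (target_key : String) (target_value : String) : Nat → Int → List (List (String × String)) → Option (List (List (String × String)))
  | fuel, idx, hasil =>
    if idx ≥ (data.length : Int) then
      (if hasil.isEmpty then none else some hasil)
    else
      match fuel with
      | 0 => none
      | fuel + 1 =>
        match PySem.List.pyGet? data idx with
        | none => none
        | some d =>
          match pvDGet d target_key with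
          | none => none
          | some v =>
            pvLoopA data target_key target_value fuel (idx + 1)
              (if v = target_value then hasil ++ [d] else hasil)

def cari_exact_rekursif (data : List (List (String × String))) (target_key : String) (target_value : String) (idx : Int) (hasil : Option (List (List (String × String)))) : Option (List (List (String × String))) :=
  match hasil with
  | none => pvLoopA data target_key target_value ((data.length : Int) - idx).toNat idx []
  | some h => pvLoopA data target_key target_value ((data.length : Int) - idx).toNat idx h

-- ===== PORT B =====
-- one body of B's for-loop: 'none' stands for a raised IndexError/KeyError (outside Pre_).
def pvStepB (data : List (List (String × String))) (target_key : String) (target_value : String) (acc : Option (List (List (String × String)))) (i : Int) : Option (List (List (String × String))) :=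
  match acc with
  | none => none
  | some h =>
    match PySem.List.pyGet? data i with
    | none => none
    | some d =>
      match pvDGet d target_key with
      | none => none
      | some v => some (if v = target_value then h ++ [d] else h)

def cari_exact_rekursif_alt (data : List (List (String × String))) (target_key : String) (target_value : String) (idx : Int) (hasil : Option (List (List (String × String)))) : Option (List (List (String × String))) :=
  let h0 := hasil.getD []
  match (PySem.List.pyRange idx (data.length : Int) 1).foldl (pvStepB data target_key target_value) (some h0) with
  | none => none
  | some h => if h.isEmpty then none else some h

-- ===== PRECONDITION & SPEC =====
-- Pre_ excludes exactly the inputs where A raises: some visited index is out of range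
-- (IndexError) or target_key is missing from a visited dict (KeyError).
def Pre_cari_exact_rekursif (data : List (List (String × String))) (target_key : String) (target_value : String) (idx : Int) (hasil : Option (List (List (String × String)))) : Prop :=
  -(data.length : Int) ≤ idx ∧
  ((PySem.List.pyRange idx (data.length : Int) 1).all (fun i =>
      match PySem.List.pyGet? data i with
      | none => false
      | some d => (pvDGet d target_key).isSome)) = true

instance (data : List (List (String × String))) (target_key : String) (target_value : String) (idx : Int) (hasil : Option (List (List (String × String)))) : Decidable (Pre_cari_exact_rekursif data target_key target_value idx hasil) := by unfold Pre_cari_exact_rekursif; infer_instance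

def pvWitness_cari_exact_rekursif : (List (List (String × String))) × String × String × Int × (Option (List (List (String × String)))) :=
  ([[("k", "v")], [("k", "w")]], "k", "v", 0, none)

def Spec_cari_exact_rekursif (data : List (List (String × String))) (target_key : String) (target_value : String) (idx : Int) (hasil : Option (List (List (String × String)))) (out : Option (List (List (String × String)))) : Prop := out = cari_exact_rekursif_alt data target_key target_value idx hasil
instance (data : List (List (String × String))) (target_key : String) (target_value : String) (idx : Int) (hasil : Option (List (List (String × String)))) (out : Option (List (List (String × String)))) : Decidable (Spec_cari_exact_rekursif data target_key target_value idx hasil out) := by unfold Spec_cari_exact_rekursif; infer_instance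

-- ===== CLAIM (what is proved, stated in full; the proofs are below) =====
def Claim_equal_cari_exact_rekursif : Prop := ∀ (data : List (List (String × String))) (target_key : String) (target_value : String) (idx : Int) (hasil : Option (List (List (String × String)))), Dom_cari_exact_rekursif data target_key target_value idx hasil → Pre_cari_exact_rekursif data target_key target_value idx hasil → Spec_cari_exact_rekursif data target_key target_value idx hasil (cari_exact_rekursif data target_key target_value idx hasil)

-- ===== LEMMAS AND PROOFS =====

lemma pvLoop_eq_fold (data : List (List (String × String))) (target_key : String) (target_value : String) :
    ∀ (fuel : Nat) (idx : Int), (data.length : Int) - idx ≤ (fuel : Int) →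
    ∀ (hasil : List (List (String × String))),
    (∀ i ∈ PySem.List.pyRange idx (data.length : Int) 1,
       ∃ d, PySem.List.pyGet? data i = some d ∧ (pvDGet d target_key).isSome) →
    pvLoopA data target_key target_value fuel idx hasil =
      (match (PySem.List.pyRange idx (data.length : Int) 1).foldl (pvStepB data target_key target_value) (some hasil) with
       | none => none
       | some h => if h.isEmpty then none else some h) := by
  intro fuel
  induction fuel with
  | zero =>
    intro idx hn hasil _
    have hge : (data.length : Int) ≤ idx := by omega
    rw [pvLoopA, PySem.List.pyRange_one_eq_nil hge]
    simp [hge]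
  | succ m ih =>
    intro idx hn hasil pre
    by_cases hge : (data.length : Int) ≤ idx
    · rw [pvLoopA, PySem.List.pyRange_one_eq_nil hge]
      simp [hge]
    · have hlt : idx < (data.length : Int) := by omega
      rw [PySem.List.pyRange_one_cons hlt] at pre ⊢
      obtain ⟨d, hd, hv⟩ := pre idx (by simp)
      obtain ⟨v, hv⟩ := Option.isSome_iff_exists.mp hv
      rw [pvLoopA]
      simp only [List.foldl_cons]
      have step : pvStepB data target_key target_value (some hasil) idx
          = some (if v = target_value then hasil ++ [d] else hasil) := by
        simp [pvStepB, hd, hv]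
      rw [if_neg (by omega)]
      simp only [hd, hv, step]
      exact ih (idx + 1) (by omega) _ (fun i hi => pre i (by simp [hi]))

-- ===== VERDICT (by name: the statement is the Claim_ definition above) =====
theorem cari_exact_rekursif_spec : Claim_equal_cari_exact_rekursif := by
  intro data tk tv idx hasil _ pre0
  have pre : ∀ i ∈ PySem.List.pyRange idx (data.length : Int) 1,
      ∃ d, PySem.List.pyGet? data i = some d ∧ (pvDGet d tk).isSome := by
    intro i hi
    have hb := List.all_eq_true.mp pre0.2 i hi
    cases h : PySem.List.pyGet? data i with
    | none => rw [h] at hb; exact absurd hb (by simp)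
    | some d => exact ⟨d, rfl, by rw [h] at hb; exact hb⟩
  unfold Spec_cari_exact_rekursif cari_exact_rekursif cari_exact_rekursif_alt
  cases hasil with
  | none => exact pvLoop_eq_fold data tk tv _ idx (by omega) [] pre
  | some h => exact pvLoop_eq_fold data tk tv _ idx (by omega) h pre
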